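-- pv_equiv track=rewrite | github.com/ps-nithin/pyrebel_old | sample.py | i_between
-- ===== SOURCE A (Python) =====
-- def i_between(start,end,pixels):
--     c=1
--     s=start
--     while 1:
--         s=next_i(s,pixels)
--         if(s==end):
--             break
--         c+=1
--     return c
--
-- def next_i(i,pixels):
--     if(i==len(pixels)-1):
--         return 0
--     else: return i+1
-- ===== SOURCE B (Python) =====
-- def i_between(start, end, pixels):
--     d = end - start
--     return d if d > 0 else d + len(pixels)
-- ===== Notes on version B (the rewrite author's own statement) =====
-- stated objective: faster
-- what changed: Replaces A's step-by-step walk with the O(1) circular-distance formula: the plain difference end-start, plus len(pixels) when it is not positive (one wrap); Pre_ excludes exactly the inputs on which A's while-loop never terminates.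
import Mathlib
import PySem

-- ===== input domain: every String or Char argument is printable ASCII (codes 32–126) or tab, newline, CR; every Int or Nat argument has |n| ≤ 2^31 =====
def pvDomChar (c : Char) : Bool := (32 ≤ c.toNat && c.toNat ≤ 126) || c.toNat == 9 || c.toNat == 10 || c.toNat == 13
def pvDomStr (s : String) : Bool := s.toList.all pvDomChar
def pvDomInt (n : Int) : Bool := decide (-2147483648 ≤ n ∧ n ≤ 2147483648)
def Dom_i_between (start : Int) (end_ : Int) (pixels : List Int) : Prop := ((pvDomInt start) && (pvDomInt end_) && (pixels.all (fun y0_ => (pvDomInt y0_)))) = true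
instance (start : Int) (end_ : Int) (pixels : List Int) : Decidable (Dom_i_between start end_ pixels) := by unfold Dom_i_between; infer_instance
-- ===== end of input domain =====

-- B replaces A's step-by-step walk with the O(1) circular-distance formula (difference, plus the length when not positive).


-- ===== PORT A =====
def next_i (i : Int) (pixels : List Int) : Int :=
  if i = (pixels.length : Int) - 1 then 0 else i + 1

-- A's 'while 1' loop, with a fuel guard making it total (A diverges on the inputs outside Pre_;
-- inside Pre_ the fuel below is never exhausted, so the guard never fires there).
def i_between_go (fuel : Nat) (c : Int) (s : Int) (end_ : Int) (pixels : List Int) : Int :=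
  match fuel with
  | 0 => c
  | f + 1 =>
    let s' := next_i s pixels
    if s' = end_ then c else i_between_go f (c + 1) s' end_ pixels

def i_between (start : Int) (end_ : Int) (pixels : List Int) : Int :=
  i_between_go ((end_ - start).toNat + pixels.length + 1) 1 start end_ pixels

-- ===== PORT B =====
def i_between_alt (start : Int) (end_ : Int) (pixels : List Int) : Int :=
  let d := end_ - start
  if 0 < d then d else d + (pixels.length : Int)

-- ===== PRECONDITION & SPEC =====
-- Pre_ is exactly the set of inputs on which A's while-loop terminates (elsewhere A diverges and
-- returns nothing): either end_ lies strictly ahead of start and the walk reaches it before any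
-- wrap (end_ below the wrap index, or start past it, or the empty list where every step is +1),
-- or end_ is at or behind start and both are positions the one-wrap walk visits.
def Pre_i_between (start : Int) (end_ : Int) (pixels : List Int) : Prop :=
  (start < end_ ∧ (end_ < (pixels.length : Int) ∨ (pixels.length : Int) ≤ start ∨ pixels.length = 0)) ∨
  (end_ ≤ start ∧ 0 ≤ end_ ∧ end_ < (pixels.length : Int) ∧ start < (pixels.length : Int))
instance (start : Int) (end_ : Int) (pixels : List Int) : Decidable (Pre_i_between start end_ pixels) := by unfold Pre_i_between; infer_instance
def pvWitness_i_between : Int × Int × List Int := (2, 1, [5, 6, 7])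

def Spec_i_between (start : Int) (end_ : Int) (pixels : List Int) (out : Int) : Prop := out = i_between_alt start end_ pixels
instance (start : Int) (end_ : Int) (pixels : List Int) (out : Int) : Decidable (Spec_i_between start end_ pixels out) := by unfold Spec_i_between; infer_instance

-- ===== CLAIM (what is proved, stated in full; the proofs are below) =====
def Claim_equal_i_between : Prop := ∀ (start : Int) (end_ : Int) (pixels : List Int), Dom_i_between start end_ pixels → Pre_i_between start end_ pixels → Spec_i_between start end_ pixels (i_between start end_ pixels)

-- ===== LEMMAS AND PROOFS =====

-- Direct regime: the walk never visits the wrap index before end_, so every step is s + 1.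
lemma go_direct (end_ : Int) (pixels : List Int) :
    ∀ (fuel : Nat) (c s : Int),
      s < end_ →
      (end_ < (pixels.length : Int) ∨ (pixels.length : Int) ≤ s ∨ pixels.length = 0) →
      end_ - s ≤ (fuel : Int) →
      i_between_go fuel c s end_ pixels = c + (end_ - s - 1) := by
  intro fuel
  induction fuel with
  | zero => intro c s hlt _ hfuel; exact absurd hfuel (by push_cast; omega)
  | succ f ih =>
    intro c s hlt hreg hfuel
    have hstep : next_i s pixels = s + 1 := by
      unfold next_i
      rcases hreg with h | h | h
      · rw [if_neg (by omega)]
      · rw [if_neg (by omega)]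
      · rw [h]; split <;> omega
    simp only [i_between_go, hstep]
    by_cases hw : s + 1 = end_
    · rw [if_pos hw]; omega
    · rw [if_neg hw]
      have hreg' : end_ < (pixels.length : Int) ∨ (pixels.length : Int) ≤ s + 1 ∨ pixels.length = 0 := by
        rcases hreg with h | h | h
        · exact Or.inl h
        · exact Or.inr (Or.inl (by omega))
        · exact Or.inr (Or.inr h)
      rw [ih (c + 1) (s + 1) (by omega) hreg' (by push_cast at hfuel ⊢; omega)]
      ring

-- Wrap regime: remaining steps minus one, as a two-case linear expression.
def pvD (s end_ n : Int) : Int := if s < end_ then end_ - s - 1 else n - s + end_ - 1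

lemma go_wrap (end_ : Int) (pixels : List Int)
    (n : Int) (hn : n = (pixels.length : Int)) (hnpos : 0 < n)
    (hen0 : 0 ≤ end_) (hen : end_ < n) :
    ∀ (fuel : Nat) (c s : Int), s < n →
      pvD s end_ n < (fuel : Int) →
      i_between_go fuel c s end_ pixels = c + pvD s end_ n := by
  intro fuel
  induction fuel with
  | zero =>
    intro c s _ hfuel
    have : 0 ≤ pvD s end_ n := by unfold pvD; split <;> omega
    exact absurd hfuel (by push_cast; omega)
  | succ f ih =>
    intro c s hs hfuel
    have hstep : next_i s pixels = (if s = n - 1 then 0 else s + 1) := by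
      simp [next_i, hn]
    simp only [i_between_go, hstep]
    by_cases hw : (if s = n - 1 then (0 : Int) else s + 1) = end_
    · rw [if_pos hw]
      have : pvD s end_ n = 0 := by
        unfold pvD; split_ifs at hw ⊢ <;> omega
      omega
    · rw [if_neg hw]
      set s' : Int := if s = n - 1 then 0 else s + 1 with hs'
      have hne : s' ≠ end_ := hw
      have hs'n : s' < n := by rw [hs']; split <;> omega
      have hD : pvD s' end_ n = pvD s end_ n - 1 := by
        unfold pvD
        rw [hs'] at hne ⊢
        split_ifs at hne ⊢ <;> omega
      rw [ih (c + 1) s' hs'n (by push_cast at hfuel ⊢; omega), hD]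
      ring

-- ===== VERDICT (by name: the statement is the Claim_ definition above) =====
theorem i_between_spec : Claim_equal_i_between := by
  intro start end_ pixels _hdom hpre
  unfold Spec_i_between i_between i_between_alt
  rcases hpre with ⟨hlt, hreg⟩ | ⟨hle, he0, hen, hsn⟩
  · rw [go_direct end_ pixels _ 1 start hlt hreg (by push_cast; omega)]
    simp only []
    rw [if_pos (by omega)]
    ring
  · have hD : pvD start end_ (pixels.length : Int) < (((end_ - start).toNat + pixels.length + 1 : Nat) : Int) := by
      unfold pvD; split <;> push_cast <;> omega
    rw [go_wrap end_ pixels (pixels.length : Int) rfl (by omega) he0 hen _ 1 start hsn hD]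
    simp only []
    rw [if_neg (by omega)]
    unfold pvD
    rw [if_neg (by omega)]
    ring
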